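-- pv_equiv track=rewrite | github.com/JayJi5204/OneDayOneAlgo | CHYW/숫자게임.py | solution
-- ===== SOURCE A (Python) =====
-- import heapq
--
-- def solution(A, B):
--     answer = 0
--     heapq.heapify(A)
--     heapq.heapify(B)
--     while A and B:
--         a = heapq.heappop(A)
--         while B:
--             b = heapq.heappop(B)
--             if a < b:
--                 answer+=1
--                 break
--
--     return answer
-- ===== SOURCE B (Python) =====
-- def solution(A, B):
--     sa = sorted(A)
--     sb = sorted(B)
--     answer = 0
--     i = j = 0
--     while i < len(sa) and j < len(sb):
--         if sa[i] < sb[j]: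
--             answer += 1
--             i += 1
--         j += 1
--     return answer
-- ===== Notes on version B (the rewrite author's own statement) =====
-- stated objective: idiomatic
-- what changed: Replaces the two heaps with heapify/heappop pop loops by sorted copies scanned once with two indices (greedy match counting B[j] > A[i]); A's in-place emptying of the argument lists is not reproduced, equivalence is on the returned count only.
import Mathlib
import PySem

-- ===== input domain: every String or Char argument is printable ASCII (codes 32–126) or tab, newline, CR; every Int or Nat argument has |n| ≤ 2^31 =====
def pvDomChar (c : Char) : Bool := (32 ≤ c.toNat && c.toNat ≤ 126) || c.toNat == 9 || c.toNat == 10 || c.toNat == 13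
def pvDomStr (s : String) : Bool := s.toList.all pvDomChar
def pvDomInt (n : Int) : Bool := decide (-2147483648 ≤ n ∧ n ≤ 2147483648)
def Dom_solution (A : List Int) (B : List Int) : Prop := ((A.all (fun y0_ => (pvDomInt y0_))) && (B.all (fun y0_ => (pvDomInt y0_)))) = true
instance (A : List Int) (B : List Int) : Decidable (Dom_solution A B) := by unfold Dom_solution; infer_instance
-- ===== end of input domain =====

-- B replaces A's two heaps (heapify + nested heappop loops) by sorted copies scanned once with
-- two indices; A empties its argument lists in place, which B does not reproduce — the
-- equivalence proved here is about the RETURNED count only.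

-- ===== PORT A =====
-- heapq.heappop on a min-heap: returns the smallest element, and the list loses that one
-- occurrence (the internal heap layout is observable here only through the popped values,
-- which for Int values are determined by the multiset; exact on that behaviour).
def popMin : List Int → Option (Int × List Int)
  | [] => none
  | x :: xs =>
    match popMin xs with
    | none => some (x, [])
    | some (m, ys) => if x ≤ m then some (x, xs) else some (m, x :: ys)

-- needed by the ports' termination arguments (cited in decreasing_by)
theorem popMin_length : ∀ {l : List Int} {m : Int} {r : List Int},
    popMin l = some (m, r) → r.length + 1 = l.length := by
  intro l
  induction l with
  | nil => intro m r h; simp [popMin] at h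
  | cons x xs ih =>
    intro m r h
    rw [popMin] at h
    rcases hx : popMin xs with _ | ⟨m', ys⟩ <;> rw [hx] at h
    · cases xs with
      | nil => simp_all
      | cons z zs =>
        rw [popMin] at hx
        rcases hz : popMin zs with _ | p <;> rw [hz] at hx <;> simp at hx
        split at hx <;> simp at hx
    · by_cases hle : x ≤ m'
      · simp only [hle, if_true, Option.some.injEq, Prod.mk.injEq] at h
        rw [← h.2]
        rfl
      · simp only [hle, if_false, Option.some.injEq, Prod.mk.injEq] at h
        have := ih hx
        rw [← h.2]
        simp only [List.length_cons]
        omega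

-- inner 'while B:' loop of A: pop b's until one beats a (gain 1, break) or B runs out
-- (gain 0); returns (gain, remaining B)
def innerPop (a : Int) (B : List Int) : Int × List Int :=
  match h : popMin B with
  | none => (0, [])
  | some (b, B') => if a < b then (1, B') else innerPop a B'
termination_by B.length
decreasing_by have := popMin_length h; omega

-- outer 'while A and B:' loop of A
def solution (A : List Int) (B : List Int) : Int :=
  match h : popMin A with
  | none => 0
  | some (a, A') =>
    if B = [] then 0
    else
      let p := innerPop a B
      p.1 + solution A' p.2
termination_by A.length
decreasing_by have := popMin_length h; omega

-- ===== PORT B =====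
-- the two-index while loop of Source B over the sorted copies, as recursion on the two lists
def twoPtr : List Int → List Int → Int
  | a :: as_, b :: bs => if a < b then 1 + twoPtr as_ bs else twoPtr (a :: as_) bs
  | _, _ => 0

def solution_alt (A : List Int) (B : List Int) : Int :=
  twoPtr (PySem.List.sorted A (fun x => x) false) (PySem.List.sorted B (fun x => x) false)

-- ===== PRECONDITION & SPEC =====
def Spec_solution (A : List Int) (B : List Int) (out : Int) : Prop := out = solution_alt A B
instance (A : List Int) (B : List Int) (out : Int) : Decidable (Spec_solution A B out) := by unfold Spec_solution; infer_instance

-- ===== CLAIM (what is proved, stated in full; the proofs are below) =====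
def Claim_equal_solution : Prop := ∀ (A : List Int) (B : List Int), Dom_solution A B → Spec_solution A B (solution A B)

-- ===== LEMMAS AND PROOFS =====

theorem popMin_none_iff (l : List Int) : popMin l = none ↔ l = [] := by
  cases l with
  | nil => simp [popMin]
  | cons x xs =>
    rw [popMin]
    rcases hx : popMin xs with _ | ⟨m, ys⟩ <;> simp
    split <;> simp

theorem popMin_perm : ∀ {l : List Int} {m : Int} {r : List Int},
    popMin l = some (m, r) → (m :: r).Perm l := by
  intro l
  induction l with
  | nil => intro m r h; simp [popMin] at h
  | cons x xs ih =>
    intro m r h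
    rw [popMin] at h
    rcases hx : popMin xs with _ | ⟨m', ys⟩ <;> rw [hx] at h
    · have hxs : xs = [] := (popMin_none_iff xs).mp hx
      simp only [Option.some.injEq, Prod.mk.injEq] at h
      rw [← h.1, ← h.2, hxs]
    · by_cases hle : x ≤ m'
      · simp only [hle, if_true, Option.some.injEq, Prod.mk.injEq] at h
        rw [← h.1, ← h.2]
      · simp only [hle, if_false, Option.some.injEq, Prod.mk.injEq] at h
        rw [← h.1, ← h.2]
        exact (List.Perm.swap x m' ys).trans ((ih hx).cons x)

theorem popMin_min : ∀ {l : List Int} {m : Int} {r : List Int},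
    popMin l = some (m, r) → ∀ y ∈ l, m ≤ y := by
  intro l
  induction l with
  | nil => intro m r h; simp [popMin] at h
  | cons x xs ih =>
    intro m r h y hy
    rw [popMin] at h
    rcases hx : popMin xs with _ | ⟨m', ys⟩ <;> rw [hx] at h
    · have hxs : xs = [] := (popMin_none_iff xs).mp hx
      simp only [Option.some.injEq, Prod.mk.injEq] at h
      subst hxs
      rcases List.mem_singleton.mp hy with rfl
      rw [← h.1]
    · by_cases hle : x ≤ m'
      · simp only [hle, if_true, Option.some.injEq, Prod.mk.injEq] at h
        rw [← h.1]
        rcases List.mem_cons.mp hy with rfl | hy'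
        · exact le_refl _
        · exact le_trans hle (ih hx y hy')
      · simp only [hle, if_false, Option.some.injEq, Prod.mk.injEq] at h
        rw [← h.1]
        rcases List.mem_cons.mp hy with rfl | hy'
        · exact le_of_lt (lt_of_not_ge hle)
        · exact ih hx y hy'

-- popping the min commutes with sorting: sorted l = m :: sorted r
theorem sorted_popMin {l : List Int} {m : Int} {r : List Int}
    (h : popMin l = some (m, r)) :
    PySem.List.sorted l (fun x => x) false = m :: PySem.List.sorted r (fun x => x) false := by
  apply PySem.List.sorted_id_eq_of_perm_of_pairwise
  · exact ((PySem.List.sorted_perm r (fun x => x) false).cons m).trans (popMin_perm h)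
  · rw [List.pairwise_cons]
    constructor
    · intro y hy
      have hyr : y ∈ r := (PySem.List.mem_sorted r (fun x => x) false y).mp hy
      exact popMin_min h y ((popMin_perm h).mem_iff.mp (List.mem_cons_of_mem m hyr))
    · exact PySem.List.sorted_pairwise r (fun x => x)

-- what the inner loop does, read on the sorted image of B: skip all b ≤ a, consume the first b > a
def skipLE (a : Int) : List Int → Int × List Int
  | [] => (0, [])
  | b :: bs => if a < b then (1, bs) else skipLE a bs


theorem innerPop_none {a : Int} {B : List Int} (h : popMin B = none) :
    innerPop a B = (0, []) := by
  rw [innerPop]; split <;> simp_all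

theorem innerPop_some {a b : Int} {B B' : List Int} (h : popMin B = some (b, B')) :
    innerPop a B = if a < b then (1, B') else innerPop a B' := by
  rw [innerPop]; split <;> simp_all

theorem solution_none {A : List Int} (B : List Int) (h : popMin A = none) :
    solution A B = 0 := by
  rw [solution]; split <;> simp_all

theorem solution_some {a : Int} {A A' : List Int} (B : List Int) (h : popMin A = some (a, A')) :
    solution A B = if B = [] then 0 else (innerPop a B).1 + solution A' (innerPop a B).2 := by
  rw [solution]; split <;> simp_all

theorem innerPop_sorted : ∀ (n : Nat) (a : Int) (B : List Int), B.length ≤ n →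
    (innerPop a B).1 = (skipLE a (PySem.List.sorted B (fun x => x) false)).1 ∧
    PySem.List.sorted (innerPop a B).2 (fun x => x) false
      = (skipLE a (PySem.List.sorted B (fun x => x) false)).2 := by
  intro n
  induction n with
  | zero =>
    intro a B hB
    have : B = [] := List.length_eq_zero_iff.mp (Nat.le_zero.mp hB)
    subst this
    rw [innerPop_none rfl]
    constructor <;> rfl
  | succ n ih =>
    intro a B hB
    rcases hp : popMin B with _ | ⟨b, B'⟩
    · have : B = [] := (popMin_none_iff B).mp hp
      subst this
      rw [innerPop_none hp]
      constructor <;> rfl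
    · rw [innerPop_some hp, sorted_popMin hp, skipLE]
      have hlen : B'.length ≤ n := by have := popMin_length hp; omega
      by_cases hab : a < b
      · simp [hab]
      · simp only [hab, if_false]
        exact ih a B' hlen

-- one step of Source B's scan: the a-pointer stands at 'a'; the loop skips b's ≤ a and
-- (if one exists) consumes the first b > a
theorem twoPtr_step (a : Int) (as_ : List Int) : ∀ (sb : List Int),
    twoPtr (a :: as_) sb = (skipLE a sb).1 + twoPtr as_ (skipLE a sb).2 := by
  intro sb
  induction sb with
  | nil => cases as_ <;> rfl
  | cons b bs ih =>
    rw [twoPtr, skipLE]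
    by_cases hab : a < b
    · simp [hab]
    · simp only [hab, if_false]
      exact ih

theorem twoPtr_nil_left (l : List Int) : twoPtr [] l = 0 := by
  cases l <;> rfl

theorem solution_eq_alt : ∀ (n : Nat) (A B : List Int), A.length ≤ n →
    solution A B = solution_alt A B := by
  intro n
  induction n with
  | zero =>
    intro A B hA
    have : A = [] := List.length_eq_zero_iff.mp (Nat.le_zero.mp hA)
    subst this
    rw [solution_none B rfl, solution_alt]
    have : PySem.List.sorted ([] : List Int) (fun x => x) false = [] := rfl
    rw [this, twoPtr_nil_left]
  | succ n ih =>
    intro A B hA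
    rcases hp : popMin A with _ | ⟨a, A'⟩
    · have : A = [] := (popMin_none_iff A).mp hp
      subst this
      rw [solution_none B rfl, solution_alt]
      have : PySem.List.sorted ([] : List Int) (fun x => x) false = [] := rfl
      rw [this, twoPtr_nil_left]
    · rw [solution_some B hp, solution_alt, sorted_popMin hp]
      by_cases hB : B = []
      · subst hB
        simp only [if_true]
        have : PySem.List.sorted ([] : List Int) (fun x => x) false = [] := rfl
        rw [this]
        rfl
      · simp only [hB, if_false]
        have hlen : A'.length ≤ n := by have := popMin_length hp; omega
        obtain ⟨h1, h2⟩ := innerPop_sorted (B.length) a B (le_refl _)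
        rw [twoPtr_step, ← h1, ← h2, ih A' (innerPop a B).2 hlen, solution_alt]

-- ===== VERDICT (by name: the statement is the Claim_ definition above) =====
theorem solution_spec : Claim_equal_solution := by
  intro A B _
  unfold Spec_solution
  exact solution_eq_alt A.length A B (le_refl _)
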